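-- pv_equiv track=rewrite | github.com/sheilsplenbluli/csvwrangler | csvwrangler/levenshtein.py | distance_column
-- ===== SOURCE A (Python) =====
-- from typing import List, Dict, Optional
--
-- def _levenshtein(a: str, b: str) -> int:
--     """Compute the Levenshtein edit distance between two strings."""
--     if a == b:
--         return 0
--     if not a:
--         return len(b)
--     if not b:
--         return len(a)
--
--     prev = list(range(len(b) + 1))
--     for i, ca in enumerate(a, 1):
--         curr = [i] + [0] * len(b)
--         for j, cb in enumerate(b, 1):
--             cost = 0 if ca == cb else 1
--             curr[j] = min(prev[j] + 1, curr[j - 1] + 1, prev[j - 1] + cost)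
--         prev = curr
--     return prev[len(b)]
--
-- def distance_column(
--     rows: List[Dict[str, str]],
--     col_a: str,
--     col_b: str,
--     dest: Optional[str] = None,
--     ignore_case: bool = False,
-- ) -> List[Dict[str, str]]:
--     """Add a column with the Levenshtein distance between two columns."""
--     out_col = dest or f"{col_a}_dist_{col_b}"
--     result = []
--     for row in rows:
--         a = row.get(col_a, "")
--         b = row.get(col_b, "")
--         if ignore_case:
--             a, b = a.lower(), b.lower()
--         dist = _levenshtein(a, b)
--         result.append({**row, out_col: str(dist)})
--     return result
-- ===== SOURCE B (Python) =====
-- def _levenshtein(a: str, b: str) -> int: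
--     """Edit distance via top-down memoized recursion on prefix lengths."""
--     memo = {}
--
--     def ed(i: int, j: int) -> int:
--         if i == 0:
--             return j
--         if j == 0:
--             return i
--         r = memo.get((i, j))
--         if r is not None:
--             return r
--         cost = 0 if a[i - 1] == b[j - 1] else 1
--         r = min(ed(i - 1, j) + 1, ed(i, j - 1) + 1, ed(i - 1, j - 1) + cost)
--         memo[(i, j)] = r
--         return r
--
--     return ed(len(a), len(b))
--
--
-- def distance_column(rows, col_a, col_b, dest=None, ignore_case=False):
--     """Add a column with the Levenshtein distance between two columns."""
--     out_col = dest or f"{col_a}_dist_{col_b}"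
--
--     def convert(row):
--         a = row.get(col_a, "")
--         b = row.get(col_b, "")
--         if ignore_case:
--             a, b = a.lower(), b.lower()
--         return {**row, out_col: str(_levenshtein(a, b))}
--
--     return [convert(row) for row in rows]
-- ===== Notes on version B (the rewrite author's own statement) =====
-- stated objective: alternative
-- what changed: The bottom-up dynamic program with a rolling row array is replaced by top-down memoized recursion on prefix lengths (ed(i,j) with a (i,j)-keyed memo dict); the per-row column logic is a list comprehension with a local helper.
import Mathlib
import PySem

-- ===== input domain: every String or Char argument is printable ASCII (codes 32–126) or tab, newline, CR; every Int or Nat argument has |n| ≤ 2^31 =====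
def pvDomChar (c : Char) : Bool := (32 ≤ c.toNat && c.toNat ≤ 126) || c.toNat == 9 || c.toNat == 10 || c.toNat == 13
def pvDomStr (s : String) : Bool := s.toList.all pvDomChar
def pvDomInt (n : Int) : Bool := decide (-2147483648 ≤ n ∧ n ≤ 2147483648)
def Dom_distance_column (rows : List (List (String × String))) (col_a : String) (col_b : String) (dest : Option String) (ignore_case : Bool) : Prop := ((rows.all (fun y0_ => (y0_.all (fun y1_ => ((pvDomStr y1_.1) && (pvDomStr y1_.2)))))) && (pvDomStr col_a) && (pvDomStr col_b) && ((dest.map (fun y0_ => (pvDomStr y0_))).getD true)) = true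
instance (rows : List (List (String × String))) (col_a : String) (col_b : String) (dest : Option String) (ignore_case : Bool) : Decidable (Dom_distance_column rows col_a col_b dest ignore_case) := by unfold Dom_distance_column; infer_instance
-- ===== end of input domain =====

-- B replaces A's bottom-up rolling-row dynamic program for the Levenshtein distance by
-- top-down memoized recursion on prefix lengths (same O(n*m) cost; objective: alternative).

-- ===== PORT A =====
-- inner 'for j, cb in enumerate(b, 1)' loop of _levenshtein
def levA_inner (ca : Char) (bs : List Char) (prev : List Int) (i : Int) : List Int :=
  (PySem.List.enumerate bs 1).foldl
    (fun curr jcb =>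
      let j := jcb.1
      let cb := jcb.2
      let cost : Int := if ca == cb then 0 else 1
      PySem.List.pySetD curr j
        (min (min (PySem.List.pyGetD prev j 0 + 1) (PySem.List.pyGetD curr (j - 1) 0 + 1))
          (PySem.List.pyGetD prev (j - 1) 0 + cost)))
    (i :: List.replicate bs.length 0)

-- _levenshtein of Source A: rolling-row bottom-up DP
def levA (a b : String) : Int :=
  if a == b then 0
  else if a.toList.isEmpty then (b.toList.length : Int)
  else if b.toList.isEmpty then (a.toList.length : Int)
  else
    let as := a.toList
    let bs := b.toList
    let prev0 : List Int := PySem.List.pyRange 0 ((bs.length : Int) + 1) 1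
    let last := (PySem.List.enumerate as 1).foldl (fun prev ica => levA_inner ica.2 bs prev ica.1) prev0
    PySem.List.pyGetD last (bs.length : Int) 0

def distance_column (rows : List (List (String × String))) (col_a : String) (col_b : String) (dest : Option String) (ignore_case : Bool) : List (List (String × String)) :=
  let out_col : String :=
    match dest with
    | some d => if d == "" then col_a ++ "_dist_" ++ col_b else d
    | none => col_a ++ "_dist_" ++ col_b
  rows.map (fun row =>
    let a := (PySem.Dict.mk row).getD col_a ""
    let b := (PySem.Dict.mk row).getD col_b ""
    let a := if ignore_case then PySem.Str.lower a else a
    let b := if ignore_case then PySem.Str.lower b else b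
    let dist := levA a b
    ((PySem.Dict.mk row).insert out_col (PySem.Int.toStr dist)).items)

-- ===== PORT B =====
-- ed(i, j) of Source B: distance between the first i chars of as and the first j chars of bs
-- (the memo dict of Source B only caches; the recursion computes these values)
-- ed(i, j) with the memo dict of Source B threaded through (returns the value and the updated memo)
def levB_go (as bs : List Char) : Nat → Nat → PySem.Dict (Nat × Nat) Int → Int × PySem.Dict (Nat × Nat) Int
  | 0, j, memo => ((j : Int), memo)
  | (i+1), 0, memo => ((i : Int) + 1, memo)
  | (i+1), (j+1), memo =>
      match memo.get? (i+1, j+1) with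
      | some r => (r, memo)
      | none =>
        let p1 := levB_go as bs i (j+1) memo
        let p2 := levB_go as bs (i+1) j p1.2
        let p3 := levB_go as bs i j p2.2
        let cost : Int := if as.getD i ' ' == bs.getD j ' ' then 0 else 1
        let r := min (min (p1.1 + 1) (p2.1 + 1)) (p3.1 + cost)
        (r, p3.2.insert (i+1, j+1) r)
  termination_by i j memo => (i, j)

def levB (a b : String) : Int :=
  (levB_go a.toList b.toList a.toList.length b.toList.length PySem.Dict.empty).1

def distance_column_alt (rows : List (List (String × String))) (col_a : String) (col_b : String) (dest : Option String) (ignore_case : Bool) : List (List (String × String)) :=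
  let out_col : String :=
    match dest with
    | some d => if d == "" then col_a ++ "_dist_" ++ col_b else d
    | none => col_a ++ "_dist_" ++ col_b
  let convert := fun (row : List (String × String)) =>
    let a := (PySem.Dict.mk row).getD col_a ""
    let b := (PySem.Dict.mk row).getD col_b ""
    let a := if ignore_case then PySem.Str.lower a else a
    let b := if ignore_case then PySem.Str.lower b else b
    ((PySem.Dict.mk row).insert out_col (PySem.Int.toStr (levB a b))).items
  rows.map convert

-- ===== PRECONDITION & SPEC =====
def Spec_distance_column (rows : List (List (String × String))) (col_a : String) (col_b : String) (dest : Option String) (ignore_case : Bool) (out : List (List (String × String))) : Prop := out = distance_column_alt rows col_a col_b dest ignore_case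
instance (rows : List (List (String × String))) (col_a : String) (col_b : String) (dest : Option String) (ignore_case : Bool) (out : List (List (String × String))) : Decidable (Spec_distance_column rows col_a col_b dest ignore_case out) := by unfold Spec_distance_column; infer_instance

-- ===== CLAIM (what is proved, stated in full; the proofs are below) =====
def Claim_equal_distance_column : Prop := ∀ (rows : List (List (String × String))) (col_a : String) (col_b : String) (dest : Option String) (ignore_case : Bool), Dom_distance_column rows col_a col_b dest ignore_case → Spec_distance_column rows col_a col_b dest ignore_case (distance_column rows col_a col_b dest ignore_case)

-- ===== LEMMAS AND PROOFS =====

-- proof-only abstraction: the pure value ed(i, j) computes (Source B's recurrence without the memo)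
def levB_ed (as bs : List Char) : Nat → Nat → Int
  | 0, j => (j : Int)
  | (i+1), 0 => (i : Int) + 1
  | (i+1), (j+1) =>
      let cost : Int := if as.getD i ' ' == bs.getD j ' ' then 0 else 1
      min (min (levB_ed as bs i (j+1) + 1) (levB_ed as bs (i+1) j + 1)) (levB_ed as bs i j + cost)
  termination_by i j => (i, j)

theorem levB_ed_nonneg (as bs : List Char) : ∀ i j, 0 ≤ levB_ed as bs i j := by
  intro i
  induction i with
  | zero => intro j; simp [levB_ed]
  | succ i ih =>
    intro j
    induction j with
    | zero => simp [levB_ed]; omega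
    | succ j ihj =>
      have h1 := ih (j+1)
      have h2 := ih j
      simp only [levB_ed]
      split_ifs with h <;> omega

theorem levB_ed_diag (l : List Char) : ∀ i, levB_ed l l i i = 0 := by
  intro i
  induction i with
  | zero => simp [levB_ed]
  | succ i ih =>
    have h1 := levB_ed_nonneg l l i (i+1)
    have h2 := levB_ed_nonneg l l (i+1) i
    simp only [levB_ed, beq_self_eq_true, if_true, ih]
    omega

theorem levA_inner_spec (as bs : List Char) (i : Nat) :
    ∀ (tl : List Char) (k : Nat) (curr : List Int),
      tl = bs.drop k → k + tl.length = bs.length →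
      curr = (List.range (k+1)).map (fun j => levB_ed as bs (i+1) j) ++ List.replicate tl.length 0 →
      (PySem.List.enumerate tl ((k : Int) + 1)).foldl
        (fun curr jcb =>
          let j := jcb.1
          let cb := jcb.2
          let cost : Int := if as.getD i ' ' == cb then 0 else 1
          PySem.List.pySetD curr j
            (min (min (PySem.List.pyGetD ((List.range (bs.length+1)).map (fun j => levB_ed as bs i j)) j 0 + 1)
                (PySem.List.pyGetD curr (j - 1) 0 + 1))
              (PySem.List.pyGetD ((List.range (bs.length+1)).map (fun j => levB_ed as bs i j)) (j - 1) 0 + cost)))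
        curr
      = (List.range (bs.length+1)).map (fun j => levB_ed as bs (i+1) j) := by
  intro tl
  induction tl with
  | nil =>
    intro k curr hdrop hlen hcurr
    have hk : k = bs.length := by simpa using hlen
    subst hk
    simp [PySem.List.enumerate, hcurr]
  | cons cb tl ih =>
    intro k curr hdrop hlen hcurr
    have hk : k < bs.length := by
      have := hlen; simp only [List.length_cons] at this; omega
    have hcb? : bs[k]? = some cb := by
      have h0 : (bs.drop k)[0]? = some cb := by rw [← hdrop]; rfl
      simpa using h0
    have hcb : bs.getD k ' ' = cb := by simp [List.getD, hcb?]
    have e1 : ((k:Int)+1) = ((k+1:Nat):Int) := by push_cast; ring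
    have e2 : ((k+1:Nat):Int) - 1 = ((k:Nat):Int) := by push_cast; ring
    rw [PySem.List.enumerate_cons, List.foldl_cons]
    simp only [e1, e2, PySem.List.pyGetD_natCast, PySem.List.pySetD_natCast]
    have g1 : ((List.range (bs.length+1)).map (fun j => levB_ed as bs i j)).getD (k+1) 0
        = levB_ed as bs i (k+1) := by simp [hk]
    have g2 : ((List.range (bs.length+1)).map (fun j => levB_ed as bs i j)).getD k 0
        = levB_ed as bs i k := by
      have : k < bs.length + 1 := by omega
      simp [this]
    have hkp : k < ((List.range (k+1)).map (fun j => levB_ed as bs (i+1) j)).length := by simp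
    have g3 : curr.getD k 0 = levB_ed as bs (i+1) k := by
      rw [hcurr]
      simp [List.getD, List.getElem?_append_left hkp]
    have hv : levB_ed as bs (i+1) (k+1)
        = min (min (levB_ed as bs i (k+1) + 1) (levB_ed as bs (i+1) k + 1))
            (levB_ed as bs i k + (if as.getD i ' ' == cb then 0 else 1)) := by
      simp only [levB_ed]
      rw [hcb]
    have g4 : curr.set (k+1) (levB_ed as bs (i+1) (k+1))
        = (List.range (k+1+1)).map (fun j => levB_ed as bs (i+1) j) ++ List.replicate tl.length 0 := by
      rw [hcurr]
      simp [List.range_succ, List.replicate_succ]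
    rw [g1, g2, g3, ← hv, g4]
    exact ih (k+1) _ (by rw [← List.tail_drop, ← hdrop, List.tail_cons])
      (by simp only [List.length_cons] at hlen ⊢; omega) rfl

theorem levA_outer_spec (as bs : List Char) :
    ∀ (tl : List Char) (k : Nat) (prev : List Int),
      tl = as.drop k → k + tl.length = as.length →
      prev = (List.range (bs.length+1)).map (fun j => levB_ed as bs k j) →
      (PySem.List.enumerate tl ((k : Int) + 1)).foldl (fun prev ica => levA_inner ica.2 bs prev ica.1) prev
      = (List.range (bs.length+1)).map (fun j => levB_ed as bs as.length j) := by
  intro tl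
  induction tl with
  | nil =>
    intro k prev hdrop hlen hprev
    have hk : k = as.length := by simpa using hlen
    subst hk
    simp [PySem.List.enumerate, hprev]
  | cons ca tl ih =>
    intro k prev hdrop hlen hprev
    have hca? : as[k]? = some ca := by
      have h0 : (as.drop k)[0]? = some ca := by rw [← hdrop]; rfl
      simpa using h0
    have hca : as.getD k ' ' = ca := by simp [List.getD, hca?]
    have e1 : ((k:Int)+1) = ((k+1:Nat):Int) := by push_cast; ring
    rw [PySem.List.enumerate_cons, List.foldl_cons]
    have hstep : levA_inner ca bs prev ((k:Int)+1)
        = (List.range (bs.length+1)).map (fun j => levB_ed as bs (k+1) j) := by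
      unfold levA_inner
      subst hprev
      rw [← hca]
      have hmain := levA_inner_spec as bs k bs 0 (((k:Int)+1) :: List.replicate bs.length 0)
        (by simp) (by simp) (by simp [levB_ed])
      simpa using hmain
    have hstep2 : levA_inner (((k:Int)+1), ca).2 bs prev (((k:Int)+1), ca).1
        = (List.range (bs.length+1)).map (fun j => levB_ed as bs (k+1) j) := hstep
    rw [hstep2, e1]
    exact ih (k+1) _ (by rw [← List.tail_drop, ← hdrop, List.tail_cons])
      (by simp only [List.length_cons] at hlen ⊢; omega) rfl

theorem levB_go_spec (as bs : List Char) :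
    ∀ i j (memo : PySem.Dict (Nat × Nat) Int),
      (∀ p r, memo.get? p = some r → r = levB_ed as bs p.1 p.2) →
      (levB_go as bs i j memo).1 = levB_ed as bs i j ∧
        (∀ p r, (levB_go as bs i j memo).2.get? p = some r → r = levB_ed as bs p.1 p.2) := by
  intro i
  induction i with
  | zero => intro j memo hinv; simp [levB_go, levB_ed]; exact fun p q r hr => hinv (p, q) r hr
  | succ i ih =>
    intro j
    induction j with
    | zero => intro memo hinv; simp [levB_go, levB_ed]; exact fun p q r hr => hinv (p, q) r hr
    | succ j ihj =>
      intro memo hinv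
      rw [levB_go]
      cases hget : PySem.Dict.get? memo (i+1, j+1) with
      | some r =>
        refine ⟨?_, hinv⟩
        exact hinv _ _ hget
      | none =>
        obtain ⟨h1, hinv1⟩ := ih (j+1) memo hinv
        obtain ⟨h2, hinv2⟩ := ihj _ hinv1
        obtain ⟨h3, hinv3⟩ := ih j _ hinv2
        dsimp only
        constructor
        · rw [h1, h2, h3]
          simp only [levB_ed]
        · intro p r hr
          rw [PySem.Dict.get?_insert] at hr
          by_cases hp : p = (i+1, j+1)
          · rw [if_pos hp] at hr
            cases hr
            rw [h1, h2, h3, hp]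
            simp only [levB_ed]
          · rw [if_neg hp] at hr
            exact hinv3 _ _ hr

theorem levB_eq_ed (a b : String) :
    levB a b = levB_ed a.toList b.toList a.toList.length b.toList.length := by
  unfold levB
  exact (levB_go_spec a.toList b.toList a.toList.length b.toList.length PySem.Dict.empty
    (by intro p r hr; simp [PySem.Dict.get?_empty] at hr)).1

theorem lev_eq (a b : String) : levA a b = levB a b := by
  rw [levB_eq_ed]
  unfold levA
  by_cases hab : a = b
  · subst hab
    rw [if_pos (by simp)]
    exact (levB_ed_diag a.toList a.toList.length).symm
  · rw [if_neg (by simpa using hab)]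
    by_cases hae : a.toList.isEmpty
    · rw [if_pos hae]
      have h0 : a.toList.length = 0 := by simpa [List.isEmpty_iff_length_eq_zero] using hae
      rw [h0]
      simp [levB_ed]
    · rw [if_neg hae]
      by_cases hbe : b.toList.isEmpty
      · rw [if_pos hbe]
        have h0 : b.toList.length = 0 := by simpa [List.isEmpty_iff_length_eq_zero] using hbe
        obtain ⟨c, tl, hcons⟩ : ∃ c tl, a.toList = c :: tl := by
          cases h : a.toList with
          | nil => simp [h] at hae
          | cons c tl => exact ⟨c, tl, rfl⟩
        rw [h0, hcons]
        simp [levB_ed]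
      · rw [if_neg hbe]
        dsimp only
        have hprev : PySem.List.pyRange 0 ((b.toList.length : Int) + 1) 1
            = (List.range (b.toList.length + 1)).map (fun j => levB_ed a.toList b.toList 0 j) := by
          have hc : ((b.toList.length : Int) + 1) = ((b.toList.length + 1 : Nat) : Int) := by push_cast; ring
          rw [hc, PySem.List.pyRange_zero_natCast]
          exact List.map_congr_left (fun x hx => by simp [levB_ed])
        have hmain := levA_outer_spec a.toList b.toList a.toList 0
          (PySem.List.pyRange 0 ((b.toList.length : Int) + 1) 1) (by simp) (by simp) hprev
        simp only [Nat.cast_zero, zero_add] at hmain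
        rw [hmain]
        simp

theorem distance_column_spec' (rows : List (List (String × String))) (col_a : String) (col_b : String) (dest : Option String) (ignore_case : Bool) :
    distance_column rows col_a col_b dest ignore_case = distance_column_alt rows col_a col_b dest ignore_case := by
  simp only [distance_column, distance_column_alt, lev_eq]

-- ===== VERDICT (by name: the statement is the Claim_ definition above) =====
theorem distance_column_spec : Claim_equal_distance_column := by
  intro rows col_a col_b dest ignore_case _
  unfold Spec_distance_column
  exact distance_column_spec' rows col_a col_b dest ignore_case
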